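-- pv_equiv track=rewrite | github.com/tirabo/Matematica-Discreta-I | python/cantero.py | pintar_linea_rec
-- ===== SOURCE A (Python) =====
-- def pintar_linea_rec(ver, i, col):
--     # pre: ver cantidad de puntos de la linea >= 2, col cantidad de colores, 0 <= i < col
--     # post:  devuelve la cantidad de formas de pintar la linea de ver puntos con
--     #       col colores tal que:
--     #       1) comienza con color 0
--     #       2) no hay dos puntos consecutivos pintados del mismo color
--     #       3) termina en el color i
--
--     # Se  hará recursión sobre n >= 2
--     ret = 0
--     if ver == 2:
--         if i == 0:
--             ret = 0
--         else:
--             ret = 1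
--     else:
--         if i == 0:
--             ret = (col - 1) * pintar_linea_rec(ver - 1, 1, col)
--         else:
--             ret = pintar_linea_rec(ver - 1, 0, col) + (col - 2) * pintar_linea_rec(ver - 1, 1, col)
--     return ret
-- ===== SOURCE B (Python) =====
-- def pintar_linea_rec(ver, i, col):
--     # pre: ver >= 2 (as documented for the original); validated explicitly.
--     # Linear two-state DP: a = colorings ending in color 0, b = colorings
--     # ending in any fixed nonzero color, for a line of growing length.
--     if ver < 2:
--         raise ValueError("ver must be >= 2")
--     a, b = 0, 1
--     for _ in range(ver - 2):
--         a, b = (col - 1) * b, a + (col - 2) * b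
--     return a if i == 0 else b
-- ===== Notes on version B (the rewrite author's own statement) =====
-- stated objective: faster
-- what changed: Replaced the exponential two-branch recursion by an iterative linear DP over the two states (ending in color 0 vs ending in a fixed nonzero color).
import Mathlib
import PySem

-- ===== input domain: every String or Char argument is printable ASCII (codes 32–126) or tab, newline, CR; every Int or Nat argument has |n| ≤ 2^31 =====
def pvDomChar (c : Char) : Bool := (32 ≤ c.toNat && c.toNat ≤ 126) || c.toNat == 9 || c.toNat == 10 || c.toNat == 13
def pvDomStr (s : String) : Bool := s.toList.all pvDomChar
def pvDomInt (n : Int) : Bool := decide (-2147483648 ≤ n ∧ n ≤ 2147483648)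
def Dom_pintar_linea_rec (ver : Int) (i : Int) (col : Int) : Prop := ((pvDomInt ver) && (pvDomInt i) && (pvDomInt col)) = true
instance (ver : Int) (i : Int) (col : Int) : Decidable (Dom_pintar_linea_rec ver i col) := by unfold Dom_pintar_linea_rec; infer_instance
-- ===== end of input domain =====

-- B replaces A's exponential two-branch recursion by an iterative linear two-state DP (different algorithm).

-- ===== PORT A =====
-- Python A recurses on ver with base case ver == 2; for ver < 2 it recurses forever
-- (RecursionError), so the port carries a fuel of ver.toNat, which suffices on Pre_ (2 ≤ ver).
def pintarGo : Nat → Int → Int → Int → Int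
  | 0, _, _, _ => 0
  | fuel + 1, ver, i, col =>
    if ver = 2 then
      if i = 0 then 0 else 1
    else
      if i = 0 then (col - 1) * pintarGo fuel (ver - 1) 1 col
      else pintarGo fuel (ver - 1) 0 col + (col - 2) * pintarGo fuel (ver - 1) 1 col

def pintar_linea_rec (ver : Int) (i : Int) (col : Int) : Int :=
  pintarGo ver.toNat ver i col

-- ===== PORT B =====
def pintarStep (col : Int) (ab : Int × Int) : Int × Int :=
  ((col - 1) * ab.2, ab.1 + (col - 2) * ab.2)

def pintar_linea_rec_alt (ver : Int) (i : Int) (col : Int) : Int :=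
  let p := (List.range (ver - 2).toNat).foldl (fun ab _ => pintarStep col ab) (0, 1)
  if i = 0 then p.1 else p.2

-- ===== PRECONDITION & SPEC =====
-- Pre_ excludes ver < 2 (outside A's stated precondition), where A recurses forever (RecursionError).
def Pre_pintar_linea_rec (ver : Int) (i : Int) (col : Int) : Prop := 2 ≤ ver
instance (ver : Int) (i : Int) (col : Int) : Decidable (Pre_pintar_linea_rec ver i col) := by unfold Pre_pintar_linea_rec; infer_instance
def pvWitness_pintar_linea_rec : Int × Int × Int := (5, 0, 3)

def Spec_pintar_linea_rec (ver : Int) (i : Int) (col : Int) (out : Int) : Prop := out = pintar_linea_rec_alt ver i col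
instance (ver : Int) (i : Int) (col : Int) (out : Int) : Decidable (Spec_pintar_linea_rec ver i col out) := by unfold Spec_pintar_linea_rec; infer_instance

-- ===== CLAIM (what is proved, stated in full; the proofs are below) =====
def Claim_equal_pintar_linea_rec : Prop := ∀ (ver : Int) (i : Int) (col : Int), Dom_pintar_linea_rec ver i col → Pre_pintar_linea_rec ver i col → Spec_pintar_linea_rec ver i col (pintar_linea_rec ver i col)

-- ===== LEMMAS AND PROOFS =====

-- The foldl over List.range ignores the index, so it is iteration of the step function.
lemma foldl_range_iterate (col : Int) (n : Nat) (init : Int × Int) :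
    (List.range n).foldl (fun ab _ => pintarStep col ab) init = (pintarStep col)^[n] init := by
  induction n generalizing init with
  | zero => simp
  | succ n ih =>
      rw [List.range_succ, List.foldl_append, ih, Function.iterate_succ_apply']
      simp

-- Core invariant: with enough fuel, A on a line of length k + 2 computes the k-th DP state.
lemma pintarGo_eq_iterate (k : Nat) :
    ∀ (fuel : Nat) (i col : Int),
      pintarGo (fuel + k + 1) ((k : Int) + 2) i col =
        (if i = 0 then ((pintarStep col)^[k] (0, 1)).1 else ((pintarStep col)^[k] (0, 1)).2) := by
  induction k with
  | zero =>
      intro fuel i col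
      simp [pintarGo]
  | succ k ih =>
      intro fuel i col
      have hfuel : fuel + (k + 1) + 1 = (fuel + k + 1) + 1 := by omega
      rw [hfuel, pintarGo]
      have hne : ¬ (((k + 1 : Nat) : Int) + 2 = 2) := by omega
      have harg : (((k + 1 : Nat) : Int) + 2) - 1 = (k : Int) + 2 := by push_cast; ring
      rw [if_neg hne, harg, ih fuel 1 col, ih fuel 0 col,
        Function.iterate_succ_apply']
      by_cases h : i = 0 <;> simp [h, pintarStep]

-- ===== VERDICT (by name: the statement is the Claim_ definition above) =====
theorem pintar_linea_rec_spec : Claim_equal_pintar_linea_rec := by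
  intro ver i col _ hpre
  have h2 : 2 ≤ ver := hpre
  obtain ⟨k, rfl⟩ : ∃ k : Nat, ver = (k : Int) + 2 := ⟨(ver - 2).toNat, by omega⟩
  unfold Spec_pintar_linea_rec pintar_linea_rec pintar_linea_rec_alt
  have h1 : ((k : Int) + 2).toNat = 1 + k + 1 := by omega
  have h3 : ((k : Int) + 2 - 2).toNat = k := by omega
  rw [h1, h3, foldl_range_iterate, pintarGo_eq_iterate k 1 i col]
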